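-- pv_equiv track=rewrite | github.com/nicolesplaining/look-ahead | activation-patching/experiment_transformers_only_all_layers.py | word_before_nth_newline
-- ===== SOURCE A (Python) =====
-- def last_word(text: str) -> str:
--     """Last alphabetic word from text, scanning from the end."""
--     for w in reversed(text.split()):
--         cleaned = w.strip(".,!?\"'—;: ")
--         if cleaned.isalpha():
--             return cleaned.lower()
--     return ""
--
-- def word_before_nth_newline(text: str, n: int) -> str:
--     """
--     Last word of the n-th line segment (the segment that ends at the n-th newline).
--     Only scans that specific line — does not fall back to earlier lines.
--     """
--     if n <= 0:
--         return ""
--     newline_positions = [i for i, ch in enumerate(text) if ch == "\n"]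
--     if len(newline_positions) < n:
--         return ""
--     end   = newline_positions[n - 1]
--     start = newline_positions[n - 2] + 1 if n >= 2 else 0
--     return last_word(text[start:end])
-- ===== SOURCE B (Python) =====
-- def last_word(text: str) -> str:
--     """Last alphabetic word from text, scanning from the end."""
--     for w in reversed(text.split()):
--         cleaned = w.strip(".,!?\"'—;: ")
--         if cleaned.isalpha():
--             return cleaned.lower()
--     return ""
--
-- def word_before_nth_newline(text: str, n: int) -> str:
--     # Single forward pass: accumulate the current line, stop at the n-th newline.
--     if n <= 0:
--         return ""
--     count = 0
--     cur = []
--     for ch in text: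
--         if ch == "\n":
--             count += 1
--             if count == n:
--                 return last_word("".join(cur))
--             cur = []
--         else:
--             cur.append(ch)
--     return ""
-- ===== Notes on version B (the rewrite author's own statement) =====
-- stated objective: simpler
-- what changed: A collects all newline positions in one pass and then slices the text between the (n-2)-th and (n-1)-th positions; B makes a single forward pass that accumulates the current line and returns last_word of it as soon as the n-th newline is seen, never materialising a position list or a slice.
import Mathlib
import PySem

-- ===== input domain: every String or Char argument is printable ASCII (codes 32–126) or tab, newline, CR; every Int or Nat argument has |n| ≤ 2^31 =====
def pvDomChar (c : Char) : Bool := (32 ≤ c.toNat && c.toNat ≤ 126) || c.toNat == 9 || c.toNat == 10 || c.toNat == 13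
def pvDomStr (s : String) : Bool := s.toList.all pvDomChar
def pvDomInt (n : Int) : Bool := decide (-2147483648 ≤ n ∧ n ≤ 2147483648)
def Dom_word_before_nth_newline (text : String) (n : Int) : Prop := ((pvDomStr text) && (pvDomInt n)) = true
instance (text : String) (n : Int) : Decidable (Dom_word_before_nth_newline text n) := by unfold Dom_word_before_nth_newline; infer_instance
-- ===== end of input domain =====

-- B replaces A's two-pass "collect all newline positions, then slice between the
-- (n-1)-th and n-th" by a single forward pass that accumulates the current line and
-- stops at the n-th newline (objective: simpler; same helper last_word in both).

-- ===== PORT A =====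
-- shared helper: last_word (identical source code in Source A and Source B)
def pvLastWordGo : List (List Char) → String
  | [] => ""
  | w :: ws =>
    let cleaned := PySem.Chars.stripChars w ".,!?\"'—;: ".toList
    if PySem.Chars.strIsalpha cleaned then String.ofList (PySem.Chars.lower cleaned)
    else pvLastWordGo ws

def pvLastWord (s : List Char) : String := pvLastWordGo (PySem.Chars.split₀ s).reverse

def word_before_nth_newline (text : String) (n : Int) : String :=
  if n ≤ 0 then ""
  else
    let positions := ((PySem.List.enumerate text.toList 0).filter (fun p => p.2 == '\n')).map (fun p => p.1)
    if PySem.List.len positions < n then ""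
    else
      let e := PySem.List.pyGetD positions (n - 1) 0
      let start := if 2 ≤ n then PySem.List.pyGetD positions (n - 2) 0 + 1 else 0
      pvLastWord (PySem.List.slice text.toList (some start) (some e))

-- ===== PORT B =====
def pvAltGo : List Char → Int → Int → List Char → String
  | [], _, _, _ => ""
  | c :: rest, n, count, acc =>
    if c = '\n' then
      if count + 1 = n then pvLastWord acc else pvAltGo rest n (count + 1) []
    else pvAltGo rest n count (acc ++ [c])

def word_before_nth_newline_alt (text : String) (n : Int) : String :=
  if n ≤ 0 then "" else pvAltGo text.toList n 0 []

-- ===== PRECONDITION & SPEC =====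
def Spec_word_before_nth_newline (text : String) (n : Int) (out : String) : Prop := out = word_before_nth_newline_alt text n
instance (text : String) (n : Int) (out : String) : Decidable (Spec_word_before_nth_newline text n out) := by unfold Spec_word_before_nth_newline; infer_instance

-- ===== CLAIM (what is proved, stated in full; the proofs are below) =====
def Claim_equal_word_before_nth_newline : Prop := ∀ (text : String) (n : Int), Dom_word_before_nth_newline text n → Spec_word_before_nth_newline text n (word_before_nth_newline text n)

-- ===== LEMMAS AND PROOFS =====

/-- A's newline-position list, with enumeration starting at `s`. -/
def pvPos (cs : List Char) (s : Int) : List Int :=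
  ((PySem.List.enumerate cs s).filter (fun p => p.2 == '\n')).map (fun p => p.1)

theorem pvPos_nil (s : Int) : pvPos [] s = [] := rfl

theorem pvPos_cons (c : Char) (cs : List Char) (s : Int) :
    pvPos (c :: cs) s = (if c = '\n' then [s] else []) ++ pvPos cs (s + 1) := by
  by_cases hc : c = '\n' <;>
    simp [pvPos, PySem.List.enumerate_cons, hc]

theorem pvPos_shift (cs : List Char) (s : Int) :
    pvPos cs (s + 1) = (pvPos cs s).map (· + 1) := by
  induction cs generalizing s with
  | nil => simp [pvPos_nil]
  | cons c cs ih =>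
    rw [pvPos_cons, pvPos_cons, ih (s + 1)]
    by_cases hc : c = '\n' <;> simp [hc]

theorem pvPos_nonneg (cs : List Char) (s : Int) (hs : 0 ≤ s) :
    ∀ x ∈ pvPos cs s, 0 ≤ x := by
  induction cs generalizing s with
  | nil => simp [pvPos_nil]
  | cons c cs ih =>
    rw [pvPos_cons]
    intro x hx
    rcases List.mem_append.1 hx with h | h
    · by_cases hc : c = '\n' <;> simp [hc] at h
      omega
    · exact ih (s + 1) (by omega) x h

/-- the n-th line segment as A computes it (slice between positions n-2 and n-1). -/
def pvSeg (cs : List Char) (n : Int) : List Char :=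
  PySem.List.slice cs
    (some (if 2 ≤ n then PySem.List.pyGetD (pvPos cs 0) (n - 2) 0 + 1 else 0))
    (some (PySem.List.pyGetD (pvPos cs 0) (n - 1) 0))

theorem pvSlice_cons_succ (c : Char) (cs : List Char) {a b : Int} (ha : 0 ≤ a) (hb : 0 ≤ b) :
    PySem.List.slice (c :: cs) (some (a + 1)) (some (b + 1)) =
      PySem.List.slice cs (some a) (some b) := by
  rw [PySem.List.slice_toNat (c :: cs) (by omega) (by omega), PySem.List.slice_toNat cs ha hb]
  have h1 : (a + 1).toNat = a.toNat + 1 := by omega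
  have h2 : (b + 1).toNat = b.toNat + 1 := by omega
  simp [h1, h2]

theorem pvSlice_cons_zero (c : Char) (cs : List Char) {b : Int} (hb : 0 ≤ b) :
    PySem.List.slice (c :: cs) (some 0) (some (b + 1)) =
      c :: PySem.List.slice cs (some 0) (some b) := by
  rw [PySem.List.slice_toNat (c :: cs) le_rfl (by omega), PySem.List.slice_toNat cs le_rfl hb]
  have h2 : (b + 1).toNat = b.toNat + 1 := by omega
  simp [h2]

theorem pvGetD_cons_shift {α : Type} (x : α) (xs : List α) (i : Int) (d : α) (h : 1 ≤ i) :
    PySem.List.pyGetD (x :: xs) i d = PySem.List.pyGetD xs (i - 1) d := by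
  simp only [PySem.List.pyGetD,
    PySem.List.pyGet?_of_nonneg (x :: xs) (show (0:Int) ≤ i by omega),
    PySem.List.pyGet?_of_nonneg xs (show (0:Int) ≤ i - 1 by omega)]
  rw [show i.toNat = (i - 1).toNat + 1 by omega]
  simp

theorem pvGetD_map_add_one (xs : List Int) (i : Int) (h0 : 0 ≤ i) (h1 : i < (xs.length : Int)) :
    PySem.List.pyGetD (xs.map (· + 1)) i 0 = PySem.List.pyGetD xs i 0 + 1 := by
  rw [PySem.List.pyGetD_eq_getElem _ _ h0 (by simpa using h1),
      PySem.List.pyGetD_eq_getElem _ _ h0 h1]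
  simp

theorem pvAltGo_shift (cs : List Char) :
    ∀ (n count : Int) (acc : List Char),
      pvAltGo cs n count acc = pvAltGo cs (n - count) 0 acc := by
  induction cs with
  | nil => intro n count acc; rfl
  | cons c rest ih =>
    intro n count acc
    by_cases hc : c = '\n'
    · simp only [pvAltGo, if_pos hc]
      by_cases hn : count + 1 = n
      · rw [if_pos hn, if_pos (by omega)]
      · rw [if_neg hn, if_neg (by omega), ih n (count + 1), ih (n - count) (0 + 1)]
        have h : n - (count + 1) = n - count - (0 + 1) := by ring
        rw [h]
    · simp only [pvAltGo, if_neg hc]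
      rw [ih n count, ih (n - count) 0, sub_zero]

theorem pvMain (cs : List Char) :
    ∀ (n : Int) (acc : List Char), 1 ≤ n →
      pvAltGo cs n 0 acc =
        if PySem.List.len (pvPos cs 0) < n then ""
        else pvLastWord ((if n = 1 then acc else []) ++ pvSeg cs n) := by
  induction cs with
  | nil =>
    intro n acc hn
    rw [if_pos (by simp [pvPos_nil, PySem.List.len_eq]; omega)]
    rfl
  | cons c rest ih =>
    intro n acc hn
    have hsh : pvPos rest 1 = (pvPos rest 0).map (· + 1) := by
      have := pvPos_shift rest 0
      simpa using this
    have hnn := pvPos_nonneg rest 0 le_rfl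
    set P := pvPos rest 0 with hPdef
    have hlen : PySem.List.len P = (P.length : Int) := PySem.List.len_eq P
    by_cases hc : c = '\n'
    · have hP' : pvPos (c :: rest) 0 = 0 :: P.map (· + 1) := by
        rw [pvPos_cons, if_pos hc]; simpa using hsh
      have hP'len : PySem.List.len (pvPos (c :: rest) 0) = (P.length : Int) + 1 := by
        rw [hP', PySem.List.len_eq]; simp
      by_cases h1 : n = 1
      · subst h1
        simp only [pvAltGo, if_pos hc, if_pos (by omega : (0:Int) + 1 = 1)]
        rw [if_neg (by rw [hP'len]; omega)]
        have hseg : pvSeg (c :: rest) 1 = [] := by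
          unfold pvSeg
          rw [hP', if_neg (by omega)]
          rw [show (1:Int) - 1 = 0 from rfl, PySem.List.pyGetD_zero_cons]
          simp [PySem.List.slice_toNat]
        rw [hseg]
        simp
      · -- n ≥ 2 : recurse into rest with n-1, the accumulated line is discarded
        simp only [pvAltGo, if_pos hc, if_neg (show ¬((0:Int) + 1 = n) by omega)]
        rw [pvAltGo_shift rest, show n - (0 + 1) = n - 1 from by ring,
            ih (n - 1) [] (by omega)]
        by_cases hlt : PySem.List.len P < n - 1
        · rw [if_pos hlt, if_pos (show PySem.List.len (pvPos (c :: rest) 0) < n from by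
            rw [hP'len]; rw [hlen] at hlt; omega)]
        · rw [if_neg hlt]
          have hlt' : n - 1 ≤ (P.length : Int) := by rw [hlen] at hlt; omega
          have hseg : pvSeg (c :: rest) n = pvSeg rest (n - 1) := by
            unfold pvSeg
            rw [hP']
            have hend : PySem.List.pyGetD (0 :: P.map (· + 1)) (n - 1) 0 =
                PySem.List.pyGetD P (n - 1 - 1) 0 + 1 := by
              rw [pvGetD_cons_shift _ _ _ _ (by omega)]
              exact pvGetD_map_add_one P (n - 1 - 1) (by omega) (by omega)
            rw [hend, if_pos (by omega : 2 ≤ n)]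
            have hb0 : 0 ≤ PySem.List.pyGetD P (n - 1 - 1) 0 := by
              exact hnn _ (PySem.List.pyGetD_mem P 0 ⟨by omega, by omega⟩)
            by_cases h2 : 2 ≤ n - 1
            · rw [if_pos h2]
              have hstart : PySem.List.pyGetD (0 :: P.map (· + 1)) (n - 2) 0 =
                  PySem.List.pyGetD P (n - 1 - 2) 0 + 1 := by
                rw [pvGetD_cons_shift _ _ _ _ (by omega),
                    show n - 2 - 1 = n - 1 - 2 from by ring]
                exact pvGetD_map_add_one P (n - 1 - 2) (by omega) (by omega)
              rw [hstart]
              have ha0 : 0 ≤ PySem.List.pyGetD P (n - 1 - 2) 0 := by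
                exact hnn _ (PySem.List.pyGetD_mem P 0 ⟨by omega, by omega⟩)
              exact pvSlice_cons_succ c rest (by omega) hb0
            · rw [if_neg h2]
              -- n = 2 : the start index on the cons side is 0 + 1
              have hstart : PySem.List.pyGetD (0 :: P.map (· + 1)) (n - 2) 0 = 0 := by
                rw [show n - 2 = 0 from by omega, PySem.List.pyGetD_zero_cons]
              rw [hstart]
              exact pvSlice_cons_succ c rest le_rfl hb0
          rw [if_neg (show ¬PySem.List.len (pvPos (c :: rest) 0) < n from by
                rw [hP'len]; omega),
              hseg, if_neg h1, ite_self]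
    · -- c ≠ '\n' : same n, the character joins the current line
      have hP' : pvPos (c :: rest) 0 = P.map (· + 1) := by
        rw [pvPos_cons, if_neg hc]; simpa using hsh
      have hP'len : PySem.List.len (pvPos (c :: rest) 0) = (P.length : Int) := by
        rw [hP', PySem.List.len_eq]; simp
      simp only [pvAltGo, if_neg hc]
      rw [ih n (acc ++ [c]) hn]
      by_cases hlt : PySem.List.len P < n
      · rw [if_pos hlt, if_pos (show PySem.List.len (pvPos (c :: rest) 0) < n from by
          rw [hP'len]; rw [hlen] at hlt; omega)]
      · rw [if_neg hlt]
        have hlt' : n ≤ (P.length : Int) := by rw [hlen] at hlt; omega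
        have hend : PySem.List.pyGetD (P.map (· + 1)) (n - 1) 0 =
            PySem.List.pyGetD P (n - 1) 0 + 1 :=
          pvGetD_map_add_one P (n - 1) (by omega) (by omega)
        have hb0 : 0 ≤ PySem.List.pyGetD P (n - 1) 0 := by
          exact hnn _ (PySem.List.pyGetD_mem P 0 ⟨by omega, by omega⟩)
        by_cases h1 : n = 1
        · subst h1
          have hseg : pvSeg (c :: rest) 1 = c :: pvSeg rest 1 := by
            unfold pvSeg
            rw [hP', if_neg (by omega), if_neg (by omega)]
            rw [show (1:Int) - 1 = 0 from rfl] at hend ⊢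
            rw [hend]
            exact pvSlice_cons_zero c rest hb0
          rw [if_neg (show ¬PySem.List.len (pvPos (c :: rest) 0) < 1 from by
                rw [hP'len]; omega),
              hseg, if_pos (show (1:Int) = 1 from rfl), if_pos (show (1:Int) = 1 from rfl)]
          simp
        · have hseg : pvSeg (c :: rest) n = pvSeg rest n := by
            unfold pvSeg
            rw [hP', if_pos (by omega : 2 ≤ n), if_pos (by omega : 2 ≤ n), hend]
            have hstart : PySem.List.pyGetD (P.map (· + 1)) (n - 2) 0 =
                PySem.List.pyGetD P (n - 2) 0 + 1 :=
              pvGetD_map_add_one P (n - 2) (by omega) (by omega)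
            rw [hstart]
            have ha0 : 0 ≤ PySem.List.pyGetD P (n - 2) 0 + 1 := by
              have h : PySem.List.pyGetD P (n - 2) 0 ∈ P :=
                PySem.List.pyGetD_mem P 0 ⟨by omega, by omega⟩
              have := hnn _ h
              omega
            exact pvSlice_cons_succ c rest ha0 hb0
          rw [if_neg (show ¬PySem.List.len (pvPos (c :: rest) 0) < n from by
                rw [hP'len]; omega),
              hseg, if_neg h1, if_neg h1]

-- ===== VERDICT (by name: the statement is the Claim_ definition above) =====
theorem word_before_nth_newline_spec : Claim_equal_word_before_nth_newline := by
  intro text n _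
  unfold Spec_word_before_nth_newline word_before_nth_newline word_before_nth_newline_alt
  by_cases hn : n ≤ 0
  · rw [if_pos hn, if_pos hn]
  · rw [if_neg hn, if_neg hn, pvMain text.toList n [] (by omega)]
    simp only [pvSeg, pvPos]
    split
    · rfl
    · simp
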